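-- pv_equiv track=rewrite | github.com/rabinkmc/dsa | 2337.py | canChange
-- ===== SOURCE A (Python) =====
-- def canChange(start: str, target: str) -> bool:
--     s = [(i, c) for i, c in enumerate(start) if c != '_']
--     e = [(i, c) for i, c in enumerate(target) if c != '_']
--     if len(s) != len(e):
--         return False
--     for (i, c1), (j, c2) in zip(s,e):
--         if c1 != c2:
--             return False
--         if c1 == "L" and i < j:
--             return False
--         if c1 == "R" and i > j:
--             return False
--     return True
-- ===== SOURCE B (Python) =====
-- def canChange(start: str, target: str) -> bool:
--     # Invariant-based check: pieces ignoring blanks must read the same, and in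
--     # every prefix target must have seen at least as many 'L' as start (L only
--     # moves left) and start at least as many 'R' as target (R only moves right).
--     if start.replace('_', '') != target.replace('_', ''):
--         return False
--     sL = sR = tL = tR = 0
--     for p in range(max(len(start), len(target))):
--         if p < len(start):
--             if start[p] == 'L':
--                 sL += 1
--             elif start[p] == 'R':
--                 sR += 1
--         if p < len(target):
--             if target[p] == 'L':
--                 tL += 1
--             elif target[p] == 'R':
--                 tR += 1
--         if sL > tL or sR < tR:
--             return False
--     return True
-- ===== Notes on version B (the rewrite author's own statement) =====
-- stated objective: alternative
-- what changed: Replaced A's pair-up-the-non-underscore-pieces-and-compare-indices check (built from two enumerate/filter comprehensions and a zip loop) by a counting invariant: the strings with '_' removed must be equal, and a single position-indexed loop keeps four running L/R counters and checks prefix-count dominance, with no piece pairing or index lists at all.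
import Mathlib
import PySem

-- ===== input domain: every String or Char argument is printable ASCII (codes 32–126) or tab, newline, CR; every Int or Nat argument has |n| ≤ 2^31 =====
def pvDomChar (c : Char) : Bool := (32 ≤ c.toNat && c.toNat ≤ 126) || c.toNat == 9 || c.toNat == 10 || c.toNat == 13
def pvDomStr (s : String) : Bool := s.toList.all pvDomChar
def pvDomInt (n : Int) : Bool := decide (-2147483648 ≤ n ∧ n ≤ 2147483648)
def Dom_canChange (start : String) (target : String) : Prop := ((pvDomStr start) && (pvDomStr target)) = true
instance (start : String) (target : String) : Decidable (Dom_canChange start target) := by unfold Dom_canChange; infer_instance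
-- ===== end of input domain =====

-- B replaces A's pair-up-the-pieces check by a counting invariant: equal piece strings (via replace) plus per-prefix L/R counter comparisons (alternative algorithm, no piece pairing).


-- ===== PORT A =====
-- the for-loop over zip s e with its early returns
def canChangeLoopA : List ((Int × Char) × (Int × Char)) → Bool
  | [] => true
  | ((i, c1), (j, c2)) :: rest =>
    if c1 ≠ c2 then false
    else if c1 = 'L' ∧ i < j then false
    else if c1 = 'R' ∧ i > j then false
    else canChangeLoopA rest

def canChange (start : String) (target : String) : Bool :=
  let s := (PySem.List.enumerate start.toList).filter (fun p => p.2 ≠ '_')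
  let e := (PySem.List.enumerate target.toList).filter (fun p => p.2 ≠ '_')
  if s.length ≠ e.length then false
  else canChangeLoopA (s.zip e)

-- ===== PORT B =====
-- the if/elif counter update of Source B's loop body (for one string's character)
def canChangeBump (c : Char) (l r : Int) : Int × Int :=
  if c = 'L' then (l + 1, r) else if c = 'R' then (l, r + 1) else (l, r)

-- Source B's single loop over p in range(max(len,len)): each step consumes the head
-- of whichever strings still extend past p, updates the counters, checks them
def canChangeLoopB : List Char → List Char → Int → Int → Int → Int → Bool
  | [], [], _, _, _, _ => true
  | a :: xs, [], sL, sR, tL, tR =>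
    let s' := canChangeBump a sL sR
    if s'.1 > tL ∨ s'.2 < tR then false else canChangeLoopB xs [] s'.1 s'.2 tL tR
  | [], b :: ys, sL, sR, tL, tR =>
    let t' := canChangeBump b tL tR
    if sL > t'.1 ∨ sR < t'.2 then false else canChangeLoopB [] ys sL sR t'.1 t'.2
  | a :: xs, b :: ys, sL, sR, tL, tR =>
    let s' := canChangeBump a sL sR
    let t' := canChangeBump b tL tR
    if s'.1 > t'.1 ∨ s'.2 < t'.2 then false
    else canChangeLoopB xs ys s'.1 s'.2 t'.1 t'.2
termination_by xs ys _ _ _ _ => xs.length + ys.length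

def canChange_alt (start : String) (target : String) : Bool :=
  if PySem.Str.replace start "_" "" ≠ PySem.Str.replace target "_" "" then false
  else canChangeLoopB start.toList target.toList 0 0 0 0

-- ===== PRECONDITION & SPEC =====
def Spec_canChange (start : String) (target : String) (out : Bool) : Prop := out = canChange_alt start target
instance (start : String) (target : String) (out : Bool) : Decidable (Spec_canChange start target out) := by unfold Spec_canChange; infer_instance

-- ===== CLAIM (what is proved, stated in full; the proofs are below) =====
def Claim_equal_canChange : Prop := ∀ (start : String) (target : String), Dom_canChange start target → Spec_canChange start target (canChange start target)

-- ===== LEMMAS AND PROOFS =====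

-- the pieces (non-underscore characters), in order
def lets (xs : List Char) : List Char := xs.filter (fun c => c ≠ '_')

-- positions (as Python indices) of character c, starting at offset i
def posC (c : Char) : List Char → Int → List Int
  | [], _ => []
  | a :: t, i => if a = c then i :: posC c t (i + 1) else posC c t (i + 1)

-- index-and-piece list of A, as a function of the char list
def filtEnum (xs : List Char) (i : Int) : List (Int × Char) :=
  (PySem.List.enumerate xs i).filter (fun p => p.2 ≠ '_')

def posOf (c : Char) (s : List (Int × Char)) : List Int :=
  (s.filter (fun p => p.2 = c)).map Prod.fst

theorem filtEnum_cons (c : Char) (xs : List Char) (i : Int) :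
    filtEnum (c :: xs) i =
      if c = '_' then filtEnum xs (i + 1) else (i, c) :: filtEnum xs (i + 1) := by
  simp only [filtEnum, PySem.List.enumerate_cons, List.filter_cons]
  by_cases h : c = '_' <;> simp [h]

theorem map_snd_filtEnum (xs : List Char) (i : Int) :
    (filtEnum xs i).map Prod.snd = lets xs := by
  induction xs generalizing i with
  | nil => rfl
  | cons a t ih =>
    rw [filtEnum_cons]
    by_cases h : a = '_' <;> simp [h, lets, List.filter_cons, ih]

theorem posOf_filtEnum (c : Char) (hc : c ≠ '_') (xs : List Char) (i : Int) :
    posOf c (filtEnum xs i) = posC c xs i := by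
  induction xs generalizing i with
  | nil => rfl
  | cons a t ih =>
    rw [filtEnum_cons, posC]
    by_cases h : a = '_'
    · subst h
      have hne : ¬ ('_' = c) := fun hh => hc hh.symm
      simp only [if_pos rfl, if_neg hne]
      exact ih (i + 1)
    · by_cases h2 : a = c
      · subst h2
        simp only [if_neg h, if_pos rfl, posOf, List.filter_cons]
        simp only [posOf] at ih
        simp [ih]
      · simp only [if_neg h, if_neg h2, posOf, List.filter_cons]
        simp only [posOf] at ih
        simp [h2, ih]

theorem posC_ge (c : Char) (xs : List Char) (i : Int) :
    ∀ x ∈ posC c xs i, i ≤ x := by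
  induction xs generalizing i with
  | nil => simp [posC]
  | cons a t ih =>
    rw [posC]
    intro x hx
    by_cases h : a = c
    · rw [if_pos h] at hx
      rcases List.mem_cons.mp hx with rfl | hx'
      · exact le_refl x
      · have := ih (i + 1) x hx'; omega
    · rw [if_neg h] at hx
      have := ih (i + 1) x hx; omega

theorem posC_pairwise (c : Char) (xs : List Char) (i : Int) :
    (posC c xs i).Pairwise (· < ·) := by
  induction xs generalizing i with
  | nil => simp [posC]
  | cons a t ih =>
    rw [posC]
    by_cases h : a = c
    · rw [if_pos h]
      exact List.pairwise_cons.mpr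
        ⟨fun x hx => by have := posC_ge c t (i + 1) x hx; omega, ih (i + 1)⟩
    · rw [if_neg h]; exact ih (i + 1)

theorem posC_length (c : Char) (xs : List Char) (i : Int) :
    (posC c xs i).length = xs.count c := by
  induction xs generalizing i with
  | nil => rfl
  | cons a t ih =>
    rw [posC, List.count_cons]
    by_cases h : a = c <;> simp [h, ih]

theorem count_lets (c : Char) (hc : c ≠ '_') (xs : List Char) :
    (lets xs).count c = xs.count c := by
  induction xs with
  | nil => rfl
  | cons a t ih =>
    rw [lets, List.filter_cons]
    by_cases h : a = '_'
    · have : a ≠ c := by rintro rfl; exact hc h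
      simp [h, this, List.count_cons, lets] at *
      simpa [this] using ih
    · simp [h, List.count_cons, lets] at *
      omega

theorem posC_filter (c : Char) (xs : List Char) (i : Int) (n : Nat) :
    ((posC c xs i).filter (fun x => x < i + (n : Int))).length = (xs.take n).count c := by
  induction xs generalizing i n with
  | nil => simp [posC]
  | cons a t ih =>
    rw [posC]
    cases n with
    | zero =>
      simp only [Nat.cast_zero, add_zero, List.take_zero, List.count_nil]
      have he : ∀ l : List Int, (∀ x ∈ l, i ≤ x) → l.filter (fun x => x < i) = [] := by
        intro l hl
        exact List.filter_eq_nil_iff.mpr (fun x hx => by simp; exact hl x hx)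
      by_cases h : a = c
      · simp only [h, if_pos rfl, List.filter_cons]
        have h1 : ¬ (i < i) := lt_irrefl i
        simp [h1, he _ (fun x hx => by have := posC_ge c t (i+1) x hx; omega)]
      · simp [h, he _ (fun x hx => by have := posC_ge c t (i+1) x hx; omega)]
    | succ m =>
      have harith : i + ((m + 1 : Nat) : Int) = (i + 1) + (m : Int) := by push_cast; ring
      by_cases h : a = c
      · rw [if_pos h]
        simp only [harith]
        have h1 : i < i + 1 + (m : Int) := by omega
        simp [List.filter_cons, h1, ih, h, List.count_cons]
      · rw [if_neg h]
        simp only [harith]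
        simp [ih, h, List.count_cons]

-- A's zip loop, characterised: letters match and the positions of each of the
-- two directed letters dominate pointwise
theorem posOf_cons (c : Char) (i : Int) (c1 : Char) (s : List (Int × Char)) :
    posOf c ((i, c1) :: s) = if c1 = c then i :: posOf c s else posOf c s := by
  simp only [posOf, List.filter_cons]
  by_cases h : c1 = c <;> simp [h]

theorem loopA_char (s e : List (Int × Char)) (h : s.length = e.length) :
    canChangeLoopA (s.zip e) = true ↔
      (s.map Prod.snd = e.map Prod.snd ∧
       (∀ p ∈ (posOf 'L' s).zip (posOf 'L' e), p.2 ≤ p.1) ∧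
       (∀ p ∈ (posOf 'R' s).zip (posOf 'R' e), p.1 ≤ p.2)) := by
  induction s generalizing e with
  | nil =>
    cases e with
    | nil => simp [canChangeLoopA, posOf]
    | cons b e' => simp at h
  | cons hd s' ih =>
    cases e with
    | nil => simp at h
    | cons he e' =>
      obtain ⟨i, c1⟩ := hd
      obtain ⟨j, c2⟩ := he
      simp only [List.length_cons, Nat.add_right_cancel_iff] at h
      rw [List.zip_cons_cons, canChangeLoopA]
      by_cases hc : c1 = c2
      · subst hc
        rw [if_neg (by simp)]
        have key := ih e' h
        by_cases hL : c1 = 'L'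
        · subst hL
          by_cases hij : i < j
          · rw [if_pos ⟨rfl, hij⟩]
            simp only [Bool.false_eq_true, false_iff]
            rintro ⟨-, hcond, -⟩
            have := hcond (i, j) (by simp [posOf_cons])
            simp at this; omega
          · have hij' : j ≤ i := le_of_not_gt hij
            rw [if_neg (by rintro ⟨-, hh⟩; exact hij hh)]
            rw [if_neg (by rintro ⟨hh, -⟩; exact absurd hh (by decide))]
            rw [key]
            simp only [posOf_cons, reduceIte, List.map_cons, List.zip_cons_cons,
              List.forall_mem_cons, List.cons.injEq, true_and]
            constructor
            · rintro ⟨h1, h2, h3⟩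
              exact ⟨h1, ⟨hij', h2⟩, h3⟩
            · rintro ⟨h1, ⟨-, h2⟩, h3⟩
              exact ⟨h1, h2, h3⟩
        · by_cases hR : c1 = 'R'
          · subst hR
            by_cases hij : i > j
            · rw [if_neg (by rintro ⟨hh, -⟩; exact absurd hh (by decide))]
              rw [if_pos ⟨rfl, hij⟩]
              simp only [Bool.false_eq_true, false_iff]
              rintro ⟨-, -, hcond⟩
              have := hcond (i, j) (by simp [posOf_cons])
              simp at this; omega
            · have hij' : i ≤ j := le_of_not_gt hij
              rw [if_neg (by rintro ⟨hh, -⟩; exact absurd hh (by decide))]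
              rw [if_neg (by rintro ⟨-, hh⟩; exact hij hh)]
              rw [key]
              simp only [posOf_cons, reduceIte, List.map_cons, List.zip_cons_cons,
                List.forall_mem_cons, List.cons.injEq, true_and]
              constructor
              · rintro ⟨h1, h2, h3⟩
                exact ⟨h1, h2, ⟨hij', h3⟩⟩
              · rintro ⟨h1, h2, ⟨-, h3⟩⟩
                exact ⟨h1, h2, h3⟩
          · rw [if_neg (by rintro ⟨hh, -⟩; exact hL hh)]
            rw [if_neg (by rintro ⟨hh, -⟩; exact hR hh)]
            rw [key]
            simp only [posOf_cons, if_neg hL, if_neg hR, List.map_cons, List.cons.injEq, true_and]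
      · rw [if_pos (by simpa using hc)]
        simp only [Bool.false_eq_true, false_iff]
        rintro ⟨h1, -, -⟩
        simp only [List.map_cons, List.cons.injEq] at h1
        exact hc h1.1

theorem count_mono_fwd (A B : List Int) (h : A.length = B.length)
    (hpt : ∀ p ∈ A.zip B, p.2 ≤ p.1) (q : Int) :
    (A.filter (fun x => x < q)).length ≤ (B.filter (fun x => x < q)).length := by
  induction A generalizing B with
  | nil => simp
  | cons a A' ih =>
    cases B with
    | nil => simp at h
    | cons b B' =>
      simp only [List.length_cons, Nat.add_right_cancel_iff] at h
      have hd : b ≤ a := by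
        have := hpt (a, b) (by rw [List.zip_cons_cons]; exact List.mem_cons_self)
        simpa using this
      have tl := ih B' h
        (fun p hp => hpt p (by rw [List.zip_cons_cons]; exact List.mem_cons_of_mem _ hp))
      simp only [List.filter_cons]
      by_cases ha : a < q
      · have hb : b < q := lt_of_le_of_lt hd ha
        simp [ha, hb]
        omega
      · by_cases hb : b < q
        · simp [ha, hb]
          omega
        · simp [ha, hb]
          exact tl

theorem count_mono_bwd (A B : List Int) (h : A.length = B.length)
    (hA : A.Pairwise (· < ·)) (hB : B.Pairwise (· < ·))
    (hq : ∀ q : Int, (A.filter (fun x => x < q)).length ≤ (B.filter (fun x => x < q)).length) :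
    ∀ p ∈ A.zip B, p.2 ≤ p.1 := by
  intro p hp
  obtain ⟨k, hk, hpk⟩ := List.mem_iff_getElem.mp hp
  have hkA : k < A.length := by simp [List.length_zip] at hk; omega
  have hkB : k < B.length := by simp [List.length_zip, h] at hk; omega
  rw [List.getElem_zip] at hpk
  subst hpk
  simp only
  -- the first k+1 elements of A all lie below A[k]+1
  have step1 : (A.take (k + 1)).filter (fun x => x < A[k] + 1) = A.take (k + 1) := by
    apply List.filter_eq_self.mpr
    intro x hx
    obtain ⟨m, hm, hmx⟩ := List.mem_iff_getElem.mp hx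
    have hm' : m < k + 1 := by simp [List.length_take] at hm; omega
    rw [List.getElem_take] at hmx
    subst hmx
    simp only [decide_eq_true_eq]
    rcases Nat.lt_or_ge m k with hmk | hmk
    · have := List.pairwise_iff_getElem.mp hA m k (by omega) hkA hmk
      omega
    · have : m = k := by omega
      subst this; omega
  have step2 : k + 1 ≤ (A.filter (fun x => x < A[k] + 1)).length := by
    have hsub : List.Sublist ((A.take (k + 1)).filter (fun x => x < A[k] + 1))
        (A.filter (fun x => x < A[k] + 1)) :=
      List.Sublist.filter _ (List.take_sublist _ _)
    have := hsub.length_le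
    rw [step1] at this
    rw [List.length_take] at this
    omega
  have step3 : k + 1 ≤ (B.filter (fun x => x < A[k] + 1)).length :=
    le_trans step2 (hq (A[k] + 1))
  -- if B[k] were above A[k], at most k elements of B could lie below A[k]+1
  by_contra hcon
  push_neg at hcon
  have hdrop : (B.drop k).filter (fun x => x < A[k] + 1) = [] := by
    apply List.filter_eq_nil_iff.mpr
    intro x hx
    obtain ⟨m, hm, hmx⟩ := List.mem_iff_getElem.mp hx
    rw [List.getElem_drop] at hmx
    subst hmx
    simp only [decide_eq_true_eq, not_lt]
    rcases Nat.eq_zero_or_pos m with rfl | hmpos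
    · simpa using hcon
    · have := List.pairwise_iff_getElem.mp hB k (k + m) hkB (by simp at hm; omega) (by omega)
      omega
  have hsplit : B.filter (fun x => x < A[k] + 1) =
      (B.take k).filter (fun x => x < A[k] + 1) ++ (B.drop k).filter (fun x => x < A[k] + 1) := by
    rw [← List.filter_append, List.take_append_drop]
  have hle : (B.filter (fun x => x < A[k] + 1)).length ≤ k := by
    rw [hsplit, List.length_append, hdrop]
    have := (List.length_filter_le (fun x => decide (x < A[k] + 1)) (B.take k))
    rw [List.length_take] at this
    simp only [List.length_nil]
    omega
  omega

theorem count_mono (A B : List Int) (h : A.length = B.length)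
    (hA : A.Pairwise (· < ·)) (hB : B.Pairwise (· < ·)) :
    (∀ p ∈ A.zip B, p.2 ≤ p.1) ↔
      ∀ q : Int, (A.filter (fun x => x < q)).length ≤ (B.filter (fun x => x < q)).length :=
  ⟨fun hpt q => count_mono_fwd A B h hpt q, fun hq => count_mono_bwd A B h hA hB hq⟩

-- B's loop, characterised by prefix counters
def chD (a c : Char) : Int := if a = c then 1 else 0

theorem bump_eq (a : Char) (l r : Int) :
    canChangeBump a l r = (l + chD a 'L', r + chD a 'R') := by
  unfold canChangeBump chD
  by_cases h : a = 'L'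
  · subst h; simp
  · by_cases h2 : a = 'R' <;> simp [h, h2]

theorem count_d (a c : Char) (w : List Char) :
    (((a :: w).count c : Nat) : Int) = ((w.count c : Nat) : Int) + chD a c := by
  rw [List.count_cons, chD]
  by_cases h : a = c <;> simp [h]

theorem loopB_char : ∀ (xs ys : List Char) (sL sR tL tR : Int), sL ≤ tL → tR ≤ sR →
    (canChangeLoopB xs ys sL sR tL tR = true ↔
      ∀ n : Nat,
        sL + ((xs.take n).count 'L' : Int) ≤ tL + ((ys.take n).count 'L' : Int) ∧
        tR + ((ys.take n).count 'R' : Int) ≤ sR + ((xs.take n).count 'R' : Int)) := by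
  intro xs
  induction xs with
  | nil =>
    intro ys
    induction ys with
    | nil =>
      intro sL sR tL tR h1 h2
      constructor
      · intro _ n
        simp [h1, h2]
      · intro _
        rw [canChangeLoopB]
    | cons b ys' ihy =>
      intro sL sR tL tR h1 h2
      rw [canChangeLoopB, bump_eq]
      by_cases hchk : sL > tL + chD b 'L' ∨ sR < tR + chD b 'R'
      · rw [if_pos hchk]
        simp only [Bool.false_eq_true, false_iff]
        intro hall
        have := hall 1
        simp only [List.take_succ_cons, List.take_nil, List.take_zero, count_d, List.count_nil,
          Nat.cast_zero, zero_add, add_zero] at this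
        omega
      · rw [if_neg hchk]
        rw [not_or, not_lt, not_lt] at hchk
        obtain ⟨hc1, hc2⟩ := hchk
        rw [ihy sL sR (tL + chD b 'L') (tR + chD b 'R') hc1 hc2]
        constructor
        · intro hall n
          cases n with
          | zero => simpa using ⟨h1, h2⟩
          | succ m =>
            have := hall m
            simp only [List.take_succ_cons, List.take_nil, List.take_zero, count_d, List.count_nil,
              Nat.cast_zero, zero_add, add_zero] at this ⊢
            omega
        · intro hall m
          have := hall (m + 1)
          simp only [List.take_succ_cons, List.take_nil, List.take_zero, count_d, List.count_nil,
            Nat.cast_zero, zero_add, add_zero] at this ⊢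
          omega
  | cons a xs' ihx =>
    intro ys sL sR tL tR h1 h2
    cases ys with
    | nil =>
      rw [canChangeLoopB, bump_eq]
      by_cases hchk : sL + chD a 'L' > tL ∨ sR + chD a 'R' < tR
      · rw [if_pos hchk]
        simp only [Bool.false_eq_true, false_iff]
        intro hall
        have := hall 1
        simp only [List.take_succ_cons, List.take_nil, List.take_zero, count_d, List.count_nil,
          Nat.cast_zero, zero_add, add_zero] at this
        omega
      · rw [if_neg hchk]
        rw [not_or, not_lt, not_lt] at hchk
        obtain ⟨hc1, hc2⟩ := hchk
        rw [ihx [] (sL + chD a 'L') (sR + chD a 'R') tL tR hc1 hc2]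
        constructor
        · intro hall n
          cases n with
          | zero => simpa using ⟨h1, h2⟩
          | succ m =>
            have := hall m
            simp only [List.take_succ_cons, List.take_nil, List.take_zero, count_d, List.count_nil,
              Nat.cast_zero, zero_add, add_zero] at this ⊢
            omega
        · intro hall m
          have := hall (m + 1)
          simp only [List.take_succ_cons, List.take_nil, List.take_zero, count_d, List.count_nil,
            Nat.cast_zero, zero_add, add_zero] at this ⊢
          omega
    | cons b ys' =>
      rw [canChangeLoopB, bump_eq, bump_eq]
      by_cases hchk : sL + chD a 'L' > tL + chD b 'L' ∨ sR + chD a 'R' < tR + chD b 'R'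
      · rw [if_pos hchk]
        simp only [Bool.false_eq_true, false_iff]
        intro hall
        have := hall 1
        simp only [List.take_succ_cons, List.take_nil, List.take_zero, count_d, List.count_nil,
          Nat.cast_zero, zero_add, add_zero] at this
        omega
      · rw [if_neg hchk]
        rw [not_or, not_lt, not_lt] at hchk
        obtain ⟨hc1, hc2⟩ := hchk
        rw [ihx ys' (sL + chD a 'L') (sR + chD a 'R') (tL + chD b 'L') (tR + chD b 'R') hc1 hc2]
        constructor
        · intro hall n
          cases n with
          | zero => simpa using ⟨h1, h2⟩
          | succ m =>
            have := hall m
            simp only [List.take_succ_cons, count_d] at this ⊢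
            omega
        · intro hall m
          have := hall (m + 1)
          simp only [List.take_succ_cons, count_d] at this ⊢
          omega


-- str.replace(s, '_', '') is the filter that drops underscores
theorem replace_go_filter : ∀ (fuel : Nat) (l acc : List Char), l.length ≤ fuel →
    PySem.Chars.replace.go ['_'] [] fuel l acc = acc.reverse ++ lets l := by
  intro fuel
  induction fuel with
  | zero =>
    intro l acc h
    have : l = [] := List.length_eq_zero_iff.mp (Nat.le_zero.mp h)
    subst this
    simp [PySem.Chars.replace.go, lets]
  | succ f ih =>
    intro l acc h
    cases l with
    | nil => simp [PySem.Chars.replace.go, lets]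
    | cons c t =>
      rw [PySem.Chars.replace.go]
      by_cases hc : c = '_'
      · subst hc
        have hp : List.isPrefixOf ['_'] ('_' :: t) = true := by simp [List.isPrefixOf]
        rw [if_pos hp]
        simp only [List.length_cons] at h
        simp only [List.length_singleton, List.drop_one, List.tail_cons, List.reverse_nil,
          List.nil_append]
        rw [ih t acc (by omega)]
        simp [lets, List.filter_cons]
      · have hp : List.isPrefixOf ['_'] (c :: t) = false := by
          simp [List.isPrefixOf, List.isPrefixOf_nil_left]
          intro hh; exact hc hh.symm
        rw [if_neg (by simp [hp])]
        simp only [List.length_cons] at h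
        rw [ih t (c :: acc) (by omega)]
        simp [lets, List.filter_cons, hc]

theorem replace_underscore (s : List Char) :
    PySem.Chars.replace s ['_'] [] = lets s := by
  rw [PySem.Chars.replace]
  have : List.isEmpty ['_'] = false := rfl
  rw [if_neg (by simp)]
  rw [replace_go_filter s.length s [] (le_refl _)]
  simp

-- swapping the sides of a zip of equal-length lists
theorem zip_swap_cond (P Q : List Int) (h : P.length = Q.length) :
    (∀ p ∈ P.zip Q, p.1 ≤ p.2) ↔ (∀ p ∈ Q.zip P, p.2 ≤ p.1) := by
  constructor <;> intro hh p hp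
  · obtain ⟨k, hk, hpk⟩ := List.mem_iff_getElem.mp hp
    rw [List.getElem_zip] at hpk
    subst hpk
    have hk1 : k < P.length := by simp [List.length_zip] at hk; omega
    have hk2 : k < Q.length := by simp [List.length_zip] at hk; omega
    have := hh (P[k], Q[k]) (by
      apply List.mem_iff_getElem.mpr
      exact ⟨k, by simp [List.length_zip]; omega, by rw [List.getElem_zip]⟩)
    simpa using this
  · obtain ⟨k, hk, hpk⟩ := List.mem_iff_getElem.mp hp
    rw [List.getElem_zip] at hpk
    subst hpk
    have hk1 : k < P.length := by simp [List.length_zip] at hk; omega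
    have hk2 : k < Q.length := by simp [List.length_zip] at hk; omega
    have := hh (Q[k], P[k]) (by
      apply List.mem_iff_getElem.mpr
      exact ⟨k, by simp [List.length_zip]; omega, by rw [List.getElem_zip]⟩)
    simpa using this

-- a ∀-over-Int cut bound can be replaced by a ∀-over-Nat bound when all
-- positions are nonnegative
theorem qn_bridge (P Q : List Int) (hP : ∀ x ∈ P, 0 ≤ x) (hQ : ∀ x ∈ Q, 0 ≤ x) :
    (∀ q : Int, (P.filter (fun x => x < q)).length ≤ (Q.filter (fun x => x < q)).length) ↔
      (∀ n : Nat, (P.filter (fun x => x < (n : Int))).length ≤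
        (Q.filter (fun x => x < (n : Int))).length) := by
  constructor
  · intro hq n; exact hq n
  · intro hn q
    by_cases hq0 : q ≤ 0
    · have e1 : P.filter (fun x => x < q) = [] := by
        apply List.filter_eq_nil_iff.mpr
        intro x hx
        have := hP x hx
        simp only [decide_eq_true_eq, not_lt]
        omega
      have e2 : Q.filter (fun x => x < q) = [] := by
        apply List.filter_eq_nil_iff.mpr
        intro x hx
        have := hQ x hx
        simp only [decide_eq_true_eq, not_lt]
        omega
      simp [e1, e2]
    · have hq0' : 0 < q := by omega
      have := hn q.toNat
      have hcast : ((q.toNat : Nat) : Int) = q := Int.toNat_of_nonneg (by omega)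
      rw [hcast] at this
      exact this

theorem posC_filter_zero (c : Char) (l : List Char) (n : Nat) :
    ((posC c l 0).filter (fun x => x < (n : Int))).length = (l.take n).count c := by
  have := posC_filter c l 0 n
  simpa using this

-- ===== VERDICT (by name: the statement is the Claim_ definition above) =====
theorem canChange_spec : Claim_equal_canChange := by
  intro start target _
  unfold Spec_canChange
  have hA : canChange start target =
      (if (filtEnum start.toList 0).length ≠ (filtEnum target.toList 0).length then false
       else canChangeLoopA ((filtEnum start.toList 0).zip (filtEnum target.toList 0))) := rfl
  have hBrep : ∀ s : String, (PySem.Str.replace s "_" "").toList = lets s.toList := by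
    intro s
    rw [PySem.Str.toList_replace]
    have h1 : ("_" : String).toList = ['_'] := rfl
    have h2 : ("" : String).toList = [] := rfl
    rw [h1, h2, replace_underscore]
  have hlenA : ∀ l : List Char, (filtEnum l 0).length = (lets l).length := by
    intro l; rw [← map_snd_filtEnum l 0, List.length_map]
  by_cases hl : lets start.toList = lets target.toList
  · -- letters agree: both sides reduce to their loops
    have hBeq : PySem.Str.replace start "_" "" = PySem.Str.replace target "_" "" := by
      apply String.toList_inj.mp
      rw [hBrep, hBrep, hl]
    have hB : canChange_alt start target = canChangeLoopB start.toList target.toList 0 0 0 0 := by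
      unfold canChange_alt
      rw [if_neg (not_not_intro hBeq)]
    have hlen : (filtEnum start.toList 0).length = (filtEnum target.toList 0).length := by
      rw [hlenA, hlenA, hl]
    rw [hA, hB, if_neg (not_not_intro hlen)]
    have hmapeq : (filtEnum start.toList 0).map Prod.snd = (filtEnum target.toList 0).map Prod.snd := by
      rw [map_snd_filtEnum, map_snd_filtEnum, hl]
    have hlenL : (posC 'L' start.toList 0).length = (posC 'L' target.toList 0).length := by
      rw [posC_length, posC_length, ← count_lets 'L' (by decide) start.toList,
        ← count_lets 'L' (by decide) target.toList, hl]
    have hlenR : (posC 'R' start.toList 0).length = (posC 'R' target.toList 0).length := by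
      rw [posC_length, posC_length, ← count_lets 'R' (by decide) start.toList,
        ← count_lets 'R' (by decide) target.toList, hl]
    rw [Bool.eq_iff_iff]
    rw [loopA_char _ _ hlen, loopB_char start.toList target.toList 0 0 0 0 le_rfl le_rfl]
    rw [posOf_filtEnum 'L' (by decide), posOf_filtEnum 'L' (by decide),
      posOf_filtEnum 'R' (by decide), posOf_filtEnum 'R' (by decide)]
    rw [count_mono _ _ hlenL (posC_pairwise _ _ _) (posC_pairwise _ _ _)]
    rw [zip_swap_cond _ _ hlenR]
    rw [count_mono _ _ hlenR.symm (posC_pairwise _ _ _) (posC_pairwise _ _ _)]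
    rw [qn_bridge _ _ (posC_ge 'L' start.toList 0) (posC_ge 'L' target.toList 0)]
    rw [qn_bridge _ _ (posC_ge 'R' target.toList 0) (posC_ge 'R' start.toList 0)]
    simp only [posC_filter_zero]
    constructor
    · rintro ⟨-, hLf, hRf⟩ n
      have h1 := hLf n
      have h2 := hRf n
      exact ⟨by omega, by omega⟩
    · intro hall
      refine ⟨hmapeq, fun n => ?_, fun n => ?_⟩
      · have := (hall n).1; omega
      · have := (hall n).2; omega
  · -- letters differ: both sides are false
    have hBne : PySem.Str.replace start "_" "" ≠ PySem.Str.replace target "_" "" := by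
      intro hh
      apply hl
      rw [← hBrep start, ← hBrep target, hh]
    have hB : canChange_alt start target = false := by
      unfold canChange_alt
      rw [if_pos hBne]
    rw [hB, hA]
    by_cases hlen : (filtEnum start.toList 0).length = (filtEnum target.toList 0).length
    · rw [if_neg (not_not_intro hlen)]
      cases hb : canChangeLoopA ((filtEnum start.toList 0).zip (filtEnum target.toList 0)) with
      | false => rfl
      | true =>
        exfalso
        have := (loopA_char _ _ hlen).mp hb
        exact hl (by rw [← map_snd_filtEnum start.toList 0, ← map_snd_filtEnum target.toList 0, this.1])
    · rw [if_pos hlen]
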